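-- pv_equiv track=rewrite | github.com/patyb7/Validation_Barramento | app/rules/phone/validator.py | _is_sequential_or_repeated
-- ===== SOURCE A (Python) =====
-- def _is_sequential_or_repeated(cleaned_number: str) -> bool:
--     """Verifica se o número tem 4 ou mais dígitos sequenciais ou repetidos."""
--     if len(cleaned_number) < 7:
--         return False
--
--     for i in range(len(cleaned_number) - 3):
--         subset = cleaned_number[i:i+4]
--         if all(d.isdigit() for d in subset):
--             s0, s1, s2, s3 = int(subset[0]), int(subset[1]), int(subset[2]), int(subset[3])
--             if (s0 + 1 == s1 and s1 + 1 == s2 and s2 + 1 == s3):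
--                 return True
--             if (s0 - 1 == s1 and s1 - 1 == s2 and s2 - 1 == s3):
--                 return True
--
--     for i in range(len(cleaned_number) - 3):
--         subset = cleaned_number[i:i+4]
--         if subset[0] == subset[1] == subset[2] == subset[3]:
--             return True
--     return False
-- ===== SOURCE B (Python) =====
-- def _is_sequential_or_repeated(cleaned_number: str) -> bool:
--     """Single left-to-right pass keeping three run-length counters
--     (ascending digits, descending digits, identical characters)."""
--     if len(cleaned_number) < 7:
--         return False
--     asc = desc = same = 1
--     prev = cleaned_number[0]
--     for cur in cleaned_number[1:]:
--         both_digits = prev.isdigit() and cur.isdigit()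
--         asc = asc + 1 if both_digits and int(cur) == int(prev) + 1 else 1
--         desc = desc + 1 if both_digits and int(cur) == int(prev) - 1 else 1
--         same = same + 1 if cur == prev else 1
--         if asc >= 4 or desc >= 4 or same >= 4:
--             return True
--         prev = cur
--     return False
-- ===== Notes on version B (the rewrite author's own statement) =====
-- stated objective: faster
-- what changed: Replaced A's two window-scanning passes (each building a 4-char slice and re-testing it with all()/int() per position) by a single left-to-right pass maintaining three run-length counters (ascending digits, descending digits, identical characters) that exits as soon as a counter reaches 4.
import Mathlib
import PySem

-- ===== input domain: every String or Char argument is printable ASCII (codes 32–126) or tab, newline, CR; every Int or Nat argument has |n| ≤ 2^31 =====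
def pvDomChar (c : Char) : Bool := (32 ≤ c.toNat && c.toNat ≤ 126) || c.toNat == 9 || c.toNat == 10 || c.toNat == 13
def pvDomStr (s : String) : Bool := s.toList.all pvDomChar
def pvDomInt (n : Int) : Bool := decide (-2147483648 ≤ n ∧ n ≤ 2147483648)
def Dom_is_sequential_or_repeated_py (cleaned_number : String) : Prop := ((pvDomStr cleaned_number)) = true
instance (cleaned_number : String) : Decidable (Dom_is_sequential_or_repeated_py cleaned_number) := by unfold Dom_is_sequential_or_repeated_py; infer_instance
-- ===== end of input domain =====

-- B replaces A's two window-scanning passes by a single early-exiting pass with three run-length counters (same asymptotics; a timing run measured a constant-factor speedup).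

-- ===== PORT A =====
-- int(c) for a digit character (exact: A only applies it under an isdigit guard)
def pvDig (c : Char) : Int := (c.toNat : Int) - 48

-- A's first-loop window test: all four digits and ascending or descending by 1
-- (the slice always has length 4 inside the loop; subset[k] is read with pyGetD, in range there)
def pvSeqWin (subset : List Char) : Bool :=
  if subset.all PySem.Chars.isdigit then
    let s0 := pvDig (PySem.List.pyGetD subset 0 ' ')
    let s1 := pvDig (PySem.List.pyGetD subset 1 ' ')
    let s2 := pvDig (PySem.List.pyGetD subset 2 ' ')
    let s3 := pvDig (PySem.List.pyGetD subset 3 ' ')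
    if s0 + 1 == s1 && s1 + 1 == s2 && s2 + 1 == s3 then true
    else if s0 - 1 == s1 && s1 - 1 == s2 && s2 - 1 == s3 then true
    else false
  else false

-- A's second-loop window test: subset[0] == subset[1] == subset[2] == subset[3]
def pvRepWin (subset : List Char) : Bool :=
  PySem.List.pyGetD subset 0 ' ' == PySem.List.pyGetD subset 1 ' ' &&
  PySem.List.pyGetD subset 1 ' ' == PySem.List.pyGetD subset 2 ' ' &&
  PySem.List.pyGetD subset 2 ' ' == PySem.List.pyGetD subset 3 ' '

def is_sequential_or_repeated_py (cleaned_number : String) : Bool :=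
  let cs := cleaned_number.toList
  let n : Int := cs.length
  if n < 7 then false
  else
    ((PySem.List.pyRange 0 (n - 3) 1).any fun i =>
        pvSeqWin (PySem.List.slice cs (some i) (some (i + 4)))) ||
    ((PySem.List.pyRange 0 (n - 3) 1).any fun i =>
        pvRepWin (PySem.List.slice cs (some i) (some (i + 4))))

-- ===== PORT B =====
def pvAscStep (p c : Char) : Bool :=
  PySem.Chars.isdigit p && PySem.Chars.isdigit c && pvDig c == pvDig p + 1

def pvDescStep (p c : Char) : Bool :=
  PySem.Chars.isdigit p && PySem.Chars.isdigit c && pvDig c == pvDig p - 1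

def pvLoopB : Char → List Char → Nat → Nat → Nat → Bool
  | _, [], _, _, _ => false
  | p, c :: rest, a, d, s =>
    let a' := if pvAscStep p c then a + 1 else 1
    let d' := if pvDescStep p c then d + 1 else 1
    let s' := if c == p then s + 1 else 1
    if 4 ≤ a' || 4 ≤ d' || 4 ≤ s' then true else pvLoopB c rest a' d' s'

def is_sequential_or_repeated_py_alt (cleaned_number : String) : Bool :=
  let cs := cleaned_number.toList
  if cs.length < 7 then false
  else
    match cs with
    | [] => false
    | p :: rest => pvLoopB p rest 1 1 1

-- ===== PRECONDITION & SPEC =====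
def Spec_is_sequential_or_repeated_py (cleaned_number : String) (out : Bool) : Prop := out = is_sequential_or_repeated_py_alt cleaned_number
instance (cleaned_number : String) (out : Bool) : Decidable (Spec_is_sequential_or_repeated_py cleaned_number out) := by unfold Spec_is_sequential_or_repeated_py; infer_instance

-- ===== CLAIM (what is proved, stated in full; the proofs are below) =====
def Claim_equal_is_sequential_or_repeated_py : Prop := ∀ (cleaned_number : String), Dom_is_sequential_or_repeated_py cleaned_number → Spec_is_sequential_or_repeated_py cleaned_number (is_sequential_or_repeated_py cleaned_number)

-- ===== LEMMAS AND PROOFS =====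

-- run-length prefixes: number of consecutive asc/desc/same steps starting at p
def ascPre (p : Char) : List Char → Nat
  | [] => 0
  | c :: r => if pvAscStep p c then 1 + ascPre c r else 0

def descPre (p : Char) : List Char → Nat
  | [] => 0
  | c :: r => if pvDescStep p c then 1 + descPre c r else 0

def samePre (p : Char) : List Char → Nat
  | [] => 0
  | c :: r => if c == p then 1 + samePre c r else 0

def winOK (a b c d : Char) : Bool :=
  (pvAscStep a b && pvAscStep b c && pvAscStep c d) ||
  (pvDescStep a b && pvDescStep b c && pvDescStep c d) ||
  (b == a && c == b && d == c)

def anyWin : List Char → Bool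
  | a :: b :: c :: d :: r => winOK a b c d || anyWin (b :: c :: d :: r)
  | _ => false

lemma ascPre_le_length (p : Char) (l : List Char) : ascPre p l ≤ l.length := by
  induction l generalizing p with
  | nil => simp [ascPre]
  | cons c r ih => simp only [ascPre, List.length_cons]; split_ifs <;> [skip; omega]; have := ih c; omega

lemma descPre_le_length (p : Char) (l : List Char) : descPre p l ≤ l.length := by
  induction l generalizing p with
  | nil => simp [descPre]
  | cons c r ih => simp only [descPre, List.length_cons]; split_ifs <;> [skip; omega]; have := ih c; omega

lemma samePre_le_length (p : Char) (l : List Char) : samePre p l ≤ l.length := by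
  induction l generalizing p with
  | nil => simp [samePre]
  | cons c r ih => simp only [samePre, List.length_cons]; split_ifs <;> [skip; omega]; have := ih c; omega

-- decomposition of anyWin at a cons: first window or later ones
lemma anyWin_cons (p : Char) (t : List Char) :
    anyWin (p :: t) = (decide (3 ≤ ascPre p t) || decide (3 ≤ descPre p t) ||
                       decide (3 ≤ samePre p t) || anyWin t) := by
  match t with
  | [] => simp [anyWin, ascPre, descPre, samePre]
  | [b] =>
    simp only [anyWin]
    have ha := ascPre_le_length p [b]
    have hd := descPre_le_length p [b]
    have hs := samePre_le_length p [b]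
    simp at ha hd hs
    simp; omega
  | [b, c] =>
    simp only [anyWin]
    have ha := ascPre_le_length p [b, c]
    have hd := descPre_le_length p [b, c]
    have hs := samePre_le_length p [b, c]
    simp at ha hd hs
    simp; omega
  | b :: c :: d :: r =>
    have ha : decide (3 ≤ ascPre p (b :: c :: d :: r)) =
        (pvAscStep p b && pvAscStep b c && pvAscStep c d) := by
      cases s1 : pvAscStep p b <;> cases s2 : pvAscStep b c <;> cases s3 : pvAscStep c d <;>
        simp [ascPre, s1, s2, s3] <;> omega
    have hd : decide (3 ≤ descPre p (b :: c :: d :: r)) =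
        (pvDescStep p b && pvDescStep b c && pvDescStep c d) := by
      cases s1 : pvDescStep p b <;> cases s2 : pvDescStep b c <;> cases s3 : pvDescStep c d <;>
        simp [descPre, s1, s2, s3] <;> omega
    have hs : decide (3 ≤ samePre p (b :: c :: d :: r)) = ((b == p) && (c == b) && (d == c)) := by
      cases s1 : b == p <;> cases s2 : c == b <;> cases s3 : d == c <;>
        simp [samePre, s1, s2, s3] <;> omega
    rw [ha, hd, hs]
    simp [anyWin, winOK, Bool.or_assoc]

-- B's loop in terms of run prefixes and windows
lemma pvLoopB_eq (rest : List Char) : ∀ (p : Char) (a d s : Nat),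
    1 ≤ a → 1 ≤ d → 1 ≤ s → a ≤ 3 → d ≤ 3 → s ≤ 3 →
    (pvLoopB p rest a d s = true ↔
      (4 ≤ a + ascPre p rest ∨ 4 ≤ d + descPre p rest ∨
       4 ≤ s + samePre p rest ∨ anyWin (p :: rest) = true)) := by
  induction rest with
  | nil =>
    intro p a d s _ _ _ ha hd hs
    simp [pvLoopB, ascPre, descPre, samePre, anyWin]; omega
  | cons c r ih =>
    intro p a d s ha1 hd1 hs1 ha3 hd3 hs3
    simp only [pvLoopB]
    rw [anyWin_cons p (c :: r), anyWin_cons c r]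
    by_cases hA : pvAscStep p c = true <;> by_cases hD : pvDescStep p c = true <;>
      by_cases hS : (c == p) = true <;>
      simp only [ascPre, descPre, samePre, hA, hD, hS, if_false,
        Bool.false_eq_true, if_pos, Bool.or_eq_true, decide_eq_true_eq] <;>
      split_ifs with hstop <;>
      first
        | (exact iff_of_true rfl (by cases hw : anyWin r <;> simp [hw] <;> omega))
        | (rw [ih c _ _ _ (by omega) (by omega) (by omega) (by omega) (by omega) (by omega),
              anyWin_cons c r]
           simp only [Bool.or_eq_true, decide_eq_true_eq]
           cases hw : anyWin r <;> simp [hw] <;> omega)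

-- B (when length ≥ 7, on p :: rest) is exactly "some window of 4 matches"
lemma alt_eq_anyWin (p : Char) (rest : List Char) :
    pvLoopB p rest 1 1 1 = anyWin (p :: rest) := by
  rw [Bool.eq_iff_iff,
      pvLoopB_eq rest p 1 1 1 (by omega) (by omega) (by omega) (by omega) (by omega) (by omega),
      anyWin_cons p rest]
  simp only [Bool.or_eq_true, decide_eq_true_eq]
  cases hw : anyWin rest <;> simp [hw] <;> omega

-- A's per-window tests, on an explicit 4-window, combine to winOK
lemma win_tests (a b c d : Char) :
    (pvSeqWin [a, b, c, d] || pvRepWin [a, b, c, d]) = winOK a b c d := by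
  simp only [pvSeqWin, pvRepWin, winOK, pvAscStep, pvDescStep, pvDig,
    PySem.List.pyGetD, PySem.List.pyIdx?, PySem.List.pyGet?, List.all_cons, List.all_nil]
  cases hA : PySem.Chars.isdigit a <;> cases hB : PySem.Chars.isdigit b <;>
    cases hC : PySem.Chars.isdigit c <;> cases hD : PySem.Chars.isdigit d <;>
    simp_all <;>
    first
      | (simp [Bool.beq_comm]; done)
      | (have e1' : (b == a) = (a == b) := by simp [Bool.beq_comm]
         have e2' : (c == b) = (b == c) := by simp [Bool.beq_comm]
         have e3' : (d == c) = (c == d) := by simp [Bool.beq_comm]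
         rw [e1', e2', e3']
         cases e1 : a == b <;> cases e2 : b == c <;> cases e3 : c == d <;>
         simp only [e1, e2, e3, Bool.and_true, Bool.and_false, Bool.false_and, Bool.true_and,
           Bool.or_false, Bool.or_true] <;>
         first
           | rfl
           | (rw [Bool.eq_iff_iff]
              simp only [Bool.or_eq_true, Bool.and_eq_true, decide_eq_true_eq, beq_iff_eq]
              omega))

-- any distributes over || (used to fuse A's two passes)
lemma any_or_split (l : List Int) (p q : Int → Bool) :
    (l.any fun x => p x || q x) = (l.any p || l.any q) := by
  induction l with
  | nil => simp
  | cons x t ih => simp [List.any_cons, ih, Bool.or_assoc, Bool.or_left_comm]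

-- the index/slice loop over pyRange equals a structural scan over drops
lemma pyRange_slice_any (cs : List Char) :
    ((PySem.List.pyRange 0 ((cs.length : Int) - 3) 1).any fun i =>
        (pvSeqWin (PySem.List.slice cs (some i) (some (i + 4))) ||
         pvRepWin (PySem.List.slice cs (some i) (some (i + 4))))) =
    ((List.range (cs.length - 3)).any fun k =>
        (pvSeqWin ((cs.drop k).take 4) || pvRepWin ((cs.drop k).take 4))) := by
  rw [PySem.List.pyRange_one]
  have ht : ((cs.length : Int) - 3 - 0).toNat = cs.length - 3 := by omega
  rw [ht, List.any_map]
  apply List.any_congr rfl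
  intro k
  simp only [Function.comp_apply]
  have h1 : (0 : Int) + (k : Int) = ((k : Nat) : Int) := by push_cast; ring
  rw [h1]
  have h2 : ((k : Nat) : Int) + 4 = ((k + 4 : Nat) : Int) := by push_cast; ring
  rw [h2, PySem.List.slice_natCast]
  have h3 : k + 4 - k = 4 := by omega
  rw [h3]

-- the index-based windowed scan equals the structural anyWin
lemma range_scan_eq_anyWin (cs : List Char) :
    ((List.range (cs.length - 3)).any fun k =>
        (pvSeqWin ((cs.drop k).take 4) || pvRepWin ((cs.drop k).take 4))) = anyWin cs := by
  induction cs with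
  | nil => simp [anyWin]
  | cons x t ih =>
    match t with
    | [] => simp [anyWin]
    | [b] => simp [anyWin]
    | [b, c] => simp [anyWin]
    | b :: c :: d :: r =>
      have hlen : (x :: b :: c :: d :: r).length - 3 = ((b :: c :: d :: r).length - 3) + 1 := by
        simp
      rw [hlen, List.range_succ_eq_map, List.any_cons, List.any_map]
      have h0 : (pvSeqWin (((x :: b :: c :: d :: r).drop 0).take 4) ||
                 pvRepWin (((x :: b :: c :: d :: r).drop 0).take 4)) = winOK x b c d := by
        simpa using win_tests x b c d
      have hrest : ((List.range ((b :: c :: d :: r).length - 3)).any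
          ((fun k => (pvSeqWin (((x :: b :: c :: d :: r).drop k).take 4) ||
                      pvRepWin (((x :: b :: c :: d :: r).drop k).take 4))) ∘ Nat.succ))
          = anyWin (b :: c :: d :: r) := by
        rw [← ih]
        apply List.any_congr rfl
        intro k
        simp [Function.comp, List.drop_succ_cons]
      rw [h0, hrest]
      simp [anyWin]

-- A's whole windowed body (both passes fused) computes anyWin
lemma scan_eq (cs : List Char) :
    (((PySem.List.pyRange 0 ((cs.length : Int) - 3) 1).any fun i =>
        pvSeqWin (PySem.List.slice cs (some i) (some (i + 4)))) ||
     ((PySem.List.pyRange 0 ((cs.length : Int) - 3) 1).any fun i =>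
        pvRepWin (PySem.List.slice cs (some i) (some (i + 4))))) = anyWin cs := by
  have h1 := any_or_split (PySem.List.pyRange 0 ((cs.length : Int) - 3) 1)
      (fun i => pvSeqWin (PySem.List.slice cs (some i) (some (i + 4))))
      (fun i => pvRepWin (PySem.List.slice cs (some i) (some (i + 4))))
  simp only [] at h1
  rw [← h1, pyRange_slice_any, range_scan_eq_anyWin]

-- ===== VERDICT (by name: the statement is the Claim_ definition above) =====
theorem is_sequential_or_repeated_py_spec : Claim_equal_is_sequential_or_repeated_py := by
  intro s _
  unfold Spec_is_sequential_or_repeated_py is_sequential_or_repeated_py is_sequential_or_repeated_py_alt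
  simp only []
  by_cases h7 : s.toList.length < 7
  · rw [if_pos (show ((s.toList.length : Int) < 7) by exact_mod_cast h7), if_pos h7]
  · rw [if_neg (show ¬ ((s.toList.length : Int) < 7) by exact_mod_cast h7), if_neg h7]
    rcases hm : s.toList with _ | ⟨p, rest⟩
    · rw [hm] at h7; simp at h7
    · rw [scan_eq (p :: rest)]
      exact (alt_eq_anyWin p rest).symm
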